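-- pv_equiv track=rewrite | github.com/TimothyShi-kika/ai-test-gec | python/gnmt_model_wrapper/data_postprocess.py | split_unk
-- ===== SOURCE A (Python) =====
-- def split_unk(sentence, vocab):
--     tokens = sentence.strip().split()
--     output_tokens = []
--     for (i, t) in enumerate(tokens):
--         if t in vocab:
--             output_tokens.append(t)
--         else:
--             output_tokens += (list(t))
--         if i < len(tokens) - 1:
--             output_tokens.append('<ss>')
--     return output_tokens
-- ===== SOURCE B (Python) =====
-- def _join_segments(tokens, vocab):
--     # Structural recursion on the token list: emit this token's segment and,
--     # if more tokens follow, a '<ss>' separator in front of the recursive rest.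
--     if not tokens:
--         return []
--     head = [tokens[0]] if tokens[0] in vocab else list(tokens[0])
--     if len(tokens) == 1:
--         return head
--     return head + ['<ss>'] + _join_segments(tokens[1:], vocab)
--
-- def split_unk(sentence, vocab):
--     return _join_segments(sentence.strip().split(), vocab)
-- ===== Notes on version B (the rewrite author's own statement) =====
-- stated objective: alternative
-- what changed: Replaces A's forward accumulator loop (enumerate index compared against len-1 to decide whether to append the separator) with structural recursion on the token list that builds the output back from the tail: each call returns its own segment, with '<ss>' and the recursively built rest appended when tokens remain, so no index, no counter and no mutable accumulator exist.
import Mathlib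
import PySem

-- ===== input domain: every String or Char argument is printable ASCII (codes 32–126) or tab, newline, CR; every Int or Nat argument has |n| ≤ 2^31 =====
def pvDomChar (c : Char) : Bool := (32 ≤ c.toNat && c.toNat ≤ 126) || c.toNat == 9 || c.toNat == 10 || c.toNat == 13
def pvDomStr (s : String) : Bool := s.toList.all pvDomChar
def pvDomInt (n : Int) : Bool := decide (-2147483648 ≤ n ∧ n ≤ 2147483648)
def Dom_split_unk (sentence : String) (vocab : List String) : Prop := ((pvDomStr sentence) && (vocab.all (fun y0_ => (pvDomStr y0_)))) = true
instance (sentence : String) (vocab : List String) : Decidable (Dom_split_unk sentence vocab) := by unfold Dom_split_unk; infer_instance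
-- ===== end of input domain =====

-- B replaces A's forward index-checked accumulator loop by structural recursion on the token list (alternative decomposition, same cost).

-- ===== PORT A =====
def split_unk (sentence : String) (vocab : List String) : List String :=
  let tokens := PySem.Str.split₀ (PySem.Str.strip sentence)
  (PySem.List.enumerate tokens).foldl
    (fun output_tokens it =>
      let output_tokens :=
        if it.2 ∈ vocab then output_tokens ++ [it.2]
        else output_tokens ++ it.2.toList.map (fun c => String.mk [c])
      if it.1 < (tokens.length : Int) - 1 then output_tokens ++ ["<ss>"] else output_tokens)
    []

-- ===== PORT B =====
def join_segments (vocab : List String) : List String → List String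
  | [] => []
  | t :: rest =>
    let head := if t ∈ vocab then [t] else t.toList.map (fun c => String.mk [c])
    match rest with
    | [] => head
    | _ :: _ => head ++ "<ss>" :: join_segments vocab rest

def split_unk_alt (sentence : String) (vocab : List String) : List String :=
  join_segments vocab (PySem.Str.split₀ (PySem.Str.strip sentence))

-- ===== PRECONDITION & SPEC =====
def Spec_split_unk (sentence : String) (vocab : List String) (out : List String) : Prop := out = split_unk_alt sentence vocab
instance (sentence : String) (vocab : List String) (out : List String) : Decidable (Spec_split_unk sentence vocab out) := by unfold Spec_split_unk; infer_instance

-- ===== CLAIM (what is proved, stated in full; the proofs are below) =====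
def Claim_equal_split_unk : Prop := ∀ (sentence : String) (vocab : List String), Dom_split_unk sentence vocab → Spec_split_unk sentence vocab (split_unk sentence vocab)

-- ===== LEMMAS AND PROOFS =====

-- A's enumerate loop over the suffix of the token list starting at index k equals B's recursion on that suffix
theorem pv_a_loop (vocab : List String) (n : Nat) :
    ∀ (l : List String) (k : Nat) (acc : List String), k + l.length = n →
      (PySem.List.enumerate l (k : Int)).foldl
        (fun output_tokens (it : Int × String) =>
          let output_tokens :=
            if it.2 ∈ vocab then output_tokens ++ [it.2]
            else output_tokens ++ it.2.toList.map (fun c => String.mk [c])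
          if it.1 < (n : Int) - 1 then output_tokens ++ ["<ss>"] else output_tokens)
        acc
      = acc ++ join_segments vocab l := by
  intro l
  induction l with
  | nil => intro k acc h; simp [PySem.List.enumerate_nil, join_segments]
  | cons t rest ih =>
    intro k acc h
    rw [PySem.List.enumerate_cons, List.foldl_cons]
    cases rest with
    | nil =>
      have hk : ¬ ((k : Int) < (n : Int) - 1) := by
        simp at h; omega
      simp only [hk, if_false]
      simp only [PySem.List.enumerate_nil, List.foldl_nil, join_segments]
      split_ifs <;> simp
    | cons u rr =>
      have hk : (k : Int) < (n : Int) - 1 := by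
        simp at h; omega
      have h' : (k + 1) + (u :: rr).length = n := by simp at h ⊢; omega
      have := ih (k + 1)
        ((if t ∈ vocab then acc ++ [t] else acc ++ t.toList.map (fun c => String.mk [c])) ++ ["<ss>"]) h'
      push_cast at this
      simp only [hk, if_pos]
      rw [this]
      simp only [join_segments]
      split_ifs <;> simp

-- ===== VERDICT (by name: the statement is the Claim_ definition above) =====
theorem split_unk_spec : Claim_equal_split_unk := by
  unfold Claim_equal_split_unk
  intro sentence vocab _
  unfold Spec_split_unk split_unk split_unk_alt
  have := pv_a_loop vocab (PySem.Str.split₀ (PySem.Str.strip sentence)).length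
    (PySem.Str.split₀ (PySem.Str.strip sentence)) 0 [] (by simp)
  rw [Nat.cast_zero, List.nil_append] at this
  exact this
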